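-- pv_equiv track=rewrite | github.com/aneeshramanathan/CS156Project | src/feature_extraction.py | _group_sensor_columns
-- ===== SOURCE A (Python) =====
-- AXIS_TOKENS = {'x', 'y', 'z'}
--
-- SENSOR_HINTS = (
--     'acc', 'accelerometer', 'gyr', 'gyro', 'gyroscope', 'mag', 'magnetometer',
--     'gravity', 'totacc', 'speed', 'velocity'
-- )
--
-- def _sanitize_feature_prefix(name: str) -> str:
--     sanitized = ''.join(ch if ch.isalnum() or ch == '_' else '_' for ch in str(name))
--     sanitized = sanitized.strip('_').lower()
--     return sanitized or 'sensor'
--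
-- def _tokenize_name(name: str):
--     return [tok for tok in name.replace('-', '_').split('_') if tok]
--
-- def _infer_group_and_axis(col_name: str):
--     base_name = col_name.replace('_preprocessed', '')
--     tokens = _tokenize_name(base_name.lower())
--
--     axis = None
--     for tok in tokens:
--         if tok in AXIS_TOKENS:
--             axis = tok
--             break
--     if axis is None:
--         axis = 'scalar'
--
--     sensor_tokens = [tok for tok in tokens if tok != axis]
--     sensor_hint = next((tok for tok in reversed(sensor_tokens) if tok in SENSOR_HINTS), None)
--     if sensor_hint:
--         group = sensor_hint
--     elif sensor_tokens:
--         group = sensor_tokens[-1]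
--     else:
--         group = base_name.lower()
--
--     return group, axis, base_name
--
-- def _group_sensor_columns(preprocessed_cols):
--     groups = {}
--     for col in preprocessed_cols:
--         group_hint, axis_hint, _ = _infer_group_and_axis(col)
--         group_key = _sanitize_feature_prefix(group_hint)
--         axis_key = _sanitize_feature_prefix(axis_hint)
--
--         if not axis_key:
--             axis_key = 'axis'
--
--         group = groups.setdefault(group_key, [])
--         axis_label = axis_key
--         existing_axes = {axis for axis, _ in group}
--         counter = 2
--         while axis_label in existing_axes:
--             axis_label = f"{axis_key}{counter}"
--             counter += 1
--
--         group.append((axis_label, col))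
--
--     return groups
-- ===== SOURCE B (Python) =====
-- AXIS_TOKENS = {'x', 'y', 'z'}
--
-- SENSOR_HINTS = (
--     'acc', 'accelerometer', 'gyr', 'gyro', 'gyroscope', 'mag', 'magnetometer',
--     'gravity', 'totacc', 'speed', 'velocity'
-- )
--
--
-- def _sanitize(name):
--     cleaned = ''.join(c if c.isalnum() or c == '_' else '_' for c in name)
--     return cleaned.strip('_').lower() or 'sensor'
--
--
-- def _keys_for(col):
--     base = col.replace('_preprocessed', '').lower()
--     tokens = [t for t in base.replace('-', '_').split('_') if t]
--     axis = next((t for t in tokens if t in AXIS_TOKENS), 'scalar')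
--     rest = [t for t in tokens if t != axis]
--     if rest:
--         group = next((t for t in reversed(rest) if t in SENSOR_HINTS), rest[-1])
--     else:
--         group = base
--     return _sanitize(group), _sanitize(axis)
--
--
-- def _label(pairs):
--     """Second pass over one group: assign unique labels, tracking the used ones."""
--     done, used = [], set()
--     for axis_key, col in pairs:
--         label, n = axis_key, 2
--         while label in used:
--             label = f"{axis_key}{n}"
--             n += 1
--         done.append((label, col))
--         used.add(label)
--     return done
--
--
-- def _group_sensor_columns(preprocessed_cols):
--     # no dict accumulation: compute keys once, list distinct group keys in
--     # first-seen order, then build each group by filtering the keyed list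
--     keyed = [(_keys_for(c), c) for c in preprocessed_cols]
--     order = []
--     for (g, _), _ in keyed:
--         if g not in order:
--             order.append(g)
--     return {g: _label([(a, c) for (gk, a), c in keyed if gk == g])
--             for g in order}
-- ===== Notes on version B (the rewrite author's own statement) =====
-- stated objective: alternative
-- what changed: A accumulates a dict with setdefault and assigns each label while inserting; B uses no dict at all: it keys every column once, lists the distinct group keys in first-seen order, rebuilds each group by filtering the keyed list, and assigns labels in a separate per-group pass with a maintained used-label set.
import Mathlib
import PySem

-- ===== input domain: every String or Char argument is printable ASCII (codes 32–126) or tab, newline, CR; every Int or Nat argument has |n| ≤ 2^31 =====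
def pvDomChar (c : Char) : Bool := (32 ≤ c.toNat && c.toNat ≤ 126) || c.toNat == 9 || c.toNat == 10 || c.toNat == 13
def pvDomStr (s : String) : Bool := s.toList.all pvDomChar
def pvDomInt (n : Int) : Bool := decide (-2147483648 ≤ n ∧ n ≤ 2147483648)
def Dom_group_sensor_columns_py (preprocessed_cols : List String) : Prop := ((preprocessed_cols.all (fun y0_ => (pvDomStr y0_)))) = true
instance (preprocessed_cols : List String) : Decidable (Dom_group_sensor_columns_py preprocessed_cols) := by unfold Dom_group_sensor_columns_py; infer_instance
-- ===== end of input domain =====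

-- B drops A's dict accumulation entirely: it lists the distinct group keys in first-seen order and
-- rebuilds each group by filtering the keyed columns, labelling them recursively; objective: alternative.

-- ===== PORT A =====
-- Strings are handled as List Char via PySem.Chars throughout (exact on the ASCII domain).

-- SENSOR_HINTS
def pvHints : List (List Char) :=
  [['a','c','c'], ['a','c','c','e','l','e','r','o','m','e','t','e','r'], ['g','y','r'],
   ['g','y','r','o'], ['g','y','r','o','s','c','o','p','e'], ['m','a','g'],
   ['m','a','g','n','e','t','o','m','e','t','e','r'], ['g','r','a','v','i','t','y'],
   ['t','o','t','a','c','c'], ['s','p','e','e','d'], ['v','e','l','o','c','i','t','y']]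

-- tok in AXIS_TOKENS  (= {'x','y','z'})
def pvIsAxisTok (t : List Char) : Bool := t == ['x'] || t == ['y'] || t == ['z']

-- _sanitize_feature_prefix
def pvSanitizeA (name : List Char) : List Char :=
  let sanitized := name.map (fun ch => if PySem.Chars.isalnum ch || ch == '_' then ch else '_')
  let sanitized := PySem.Chars.lower (PySem.Chars.stripChars sanitized ['_'])
  if sanitized.isEmpty then ['s','e','n','s','o','r'] else sanitized

-- _tokenize_name
def pvTokenizeA (name : List Char) : List (List Char) :=
  (PySem.Chars.splitOn (PySem.Chars.replace name ['-'] ['_']) ['_']).filter (fun tok => !tok.isEmpty)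

-- _infer_group_and_axis : returns (group, axis, base_name)
def pvInferA (colName : List Char) : List Char × List Char × List Char :=
  let baseName := PySem.Chars.replace colName
      ['_','p','r','e','p','r','o','c','e','s','s','e','d'] []
  let tokens := pvTokenizeA (PySem.Chars.lower baseName)
  let axis := match tokens.find? pvIsAxisTok with
    | some tok => tok
    | none => ['s','c','a','l','a','r']
  let sensorTokens := tokens.filter (fun tok => tok != axis)
  let sensorHint := sensorTokens.reverse.find? (fun tok => pvHints.contains tok)
  let group := match sensorHint with
    | some h => h
    | none => match sensorTokens.getLast? with
      | some last => last
      | none => PySem.Chars.lower baseName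
  (group, axis, baseName)

-- the 'while axis_label in <already-used labels>' probe loop, shared verbatim by both Pythons
-- (fuel ≥ existing.length + 1 always suffices: the candidates tried are pairwise distinct,
-- existing has only existing.length members)
def pvProbe (axisKey label : List Char) (existing : List (List Char)) (counter : Int) : Nat → List Char
  | 0 => label
  | fuel + 1 =>
    if existing.contains label then
      pvProbe axisKey (axisKey ++ PySem.Int.toChars counter) existing (counter + 1) fuel
    else label

def group_sensor_columns_py (preprocessed_cols : List String) : List (String × List (String × String)) :=
  let groups := preprocessed_cols.foldl
    (fun (groups : PySem.Dict (List Char) (List (List Char × String))) col =>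
      let gia := pvInferA col.toList
      let groupKey := pvSanitizeA gia.1
      let axisKey0 := pvSanitizeA gia.2.1
      let axisKey := if axisKey0.isEmpty then ['a','x','i','s'] else axisKey0
      let group := groups.getD groupKey []
      let existingAxes : PySem.Set (List Char) := PySem.Set.ofList (group.map (·.1))
      let axisLabel := pvProbe axisKey axisKey existingAxes 2 (group.length + 1)
      groups.insert groupKey (group ++ [(axisLabel, col)]))
    PySem.Dict.empty
  groups.items.map (fun p => (String.ofList p.1, p.2.map (fun q => (String.ofList q.1, q.2))))

-- ===== PORT B =====

-- _keys_for
def pvKeysForB (col : List Char) : List Char × List Char :=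
  let base := PySem.Chars.lower (PySem.Chars.replace col
      ['_','p','r','e','p','r','o','c','e','s','s','e','d'] [])
  let tokens := (PySem.Chars.splitOn (PySem.Chars.replace base ['-'] ['_']) ['_']).filter
      (fun t => !t.isEmpty)
  let axis := (tokens.find? pvIsAxisTok).getD ['s','c','a','l','a','r']
  let rest := tokens.filter (fun t => t != axis)
  let group := match rest.reverse with
    | [] => base
    | last :: earlier => (((last :: earlier).find? (fun t => pvHints.contains t)).getD last)
  (pvSanitizeA group, pvSanitizeA axis)

-- _label : second pass over one group's pairs, state = (done, used)
def pvLabelB (pairs : List (List Char × String)) : List (List Char × String) :=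
  (pairs.foldl
    (fun (st : List (List Char × String) × PySem.Set (List Char)) p =>
      let label := pvProbe p.1 p.1 st.2 2 (st.1.length + 1)
      (st.1 ++ [(label, p.2)], st.2.add label))
    ([], PySem.Set.empty)).1

def group_sensor_columns_py_alt (preprocessed_cols : List String) : List (String × List (String × String)) :=
  let keyed := preprocessed_cols.map (fun c => (pvKeysForB c.toList, c))
  let order := keyed.foldl
    (fun (o : PySem.Set (List Char)) p => o.add p.1.1) PySem.Set.empty
  order.map (fun g =>
    (String.ofList g,
     (pvLabelB ((keyed.filter (fun p => p.1.1 == g)).map (fun p => (p.1.2, p.2)))).map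
       (fun q => (String.ofList q.1, q.2))))

-- ===== PRECONDITION & SPEC =====
def Spec_group_sensor_columns_py (preprocessed_cols : List String) (out : List (String × List (String × String))) : Prop := out = group_sensor_columns_py_alt preprocessed_cols
instance (preprocessed_cols : List String) (out : List (String × List (String × String))) : Decidable (Spec_group_sensor_columns_py preprocessed_cols out) := by unfold Spec_group_sensor_columns_py; infer_instance

-- ===== CLAIM (what is proved, stated in full; the proofs are below) =====
def Claim_equal_group_sensor_columns_py : Prop := ∀ (preprocessed_cols : List String), Dom_group_sensor_columns_py preprocessed_cols → Spec_group_sensor_columns_py preprocessed_cols (group_sensor_columns_py preprocessed_cols)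

-- ===== LEMMAS AND PROOFS =====

-- pvSanitizeA never returns the empty string, so A's dead "axis" fallback never fires
theorem pvSanitizeA_ne_empty (name : List Char) : (pvSanitizeA name).isEmpty = false := by
  unfold pvSanitizeA
  dsimp only
  split <;> simp_all

-- B's key computation: the group fallback chain, written on an arbitrary rest list
theorem pvGroup_eq (base : List Char) (rest : List (List Char)) :
    (match rest.reverse with
      | [] => base
      | last :: earlier => (((last :: earlier).find? (fun t => pvHints.contains t)).getD last))
    = (match rest.reverse.find? (fun tok => pvHints.contains tok) with
      | some h => h
      | none => match rest.getLast? with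
        | some last => last
        | none => base) := by
  cases hrev : rest.reverse with
  | nil =>
      have h0 : rest = [] := by simpa using congrArg List.reverse hrev
      subst h0
      rfl
  | cons last earlier =>
      have hlast : rest.getLast? = some last := by
        rw [List.getLast?_eq_head?_reverse, hrev]; rfl
      dsimp only
      cases hh : (last :: earlier).find? (fun t => pvHints.contains t) with
      | some h => rfl
      | none => simp [hlast]

-- B's key computation equals A's (sanitised group key, sanitised axis key)
theorem pvKeys_eq (col : List Char) :
    pvKeysForB col = (pvSanitizeA (pvInferA col).1, pvSanitizeA (pvInferA col).2.1) := by
  unfold pvKeysForB pvInferA pvTokenizeA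
  dsimp only
  cases hfind : (List.filter (fun t => !t.isEmpty)
      (PySem.Chars.splitOn (PySem.Chars.replace (PySem.Chars.lower (PySem.Chars.replace col
        ['_','p','r','e','p','r','o','c','e','s','s','e','d'] [])) ['-'] ['_']) ['_'])).find? pvIsAxisTok with
  | some tok => exact congrArg (fun g => (pvSanitizeA g, pvSanitizeA tok)) (pvGroup_eq _ _)
  | none => exact congrArg (fun g => (pvSanitizeA g, pvSanitizeA _)) (pvGroup_eq _ _)

-- probe only looks at membership in `existing`
theorem pvProbe_congr : ∀ (fuel : Nat) (axisKey label : List Char) (e₁ e₂ : List (List Char)),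
    (∀ s, e₁.contains s = e₂.contains s) → ∀ (counter : Int),
    pvProbe axisKey label e₁ counter fuel = pvProbe axisKey label e₂ counter fuel := by
  intro fuel
  induction fuel with
  | zero => intro _ _ _ _ _ _; rfl
  | succ n ih =>
      intro ak lbl e₁ e₂ h c
      unfold pvProbe
      rw [h lbl]
      split
      · exact ih ak _ e₁ e₂ h (c + 1)
      · rfl

-- a Python set's membership is membership of the underlying list it was built from
theorem pvContains_ofList (l : List (List Char)) (s : List Char) :
    (PySem.Set.ofList l).contains s = l.contains s := by
  rw [Bool.eq_iff_iff]; simp [PySem.Set.mem_ofList]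

-- Bool membership laws for the probe's collections
theorem pvContains_snoc (l : List (List Char)) (x s : List Char) :
    (l ++ [x]).contains s = (l.contains s || s == x) := by
  simp [List.contains_eq_mem, List.mem_append, Bool.decide_or, beq_eq_decide]

theorem pvContains_add (U : PySem.Set (List Char)) (x s : List Char) :
    (U.add x).contains s = (U.contains s || s == x) := by
  simp only [PySem.Set.add]
  split
  next hc =>
    by_cases hs : s = x
    · subst hs; rw [hc]; simp
    · simp [hs]
  next hc => exact pvContains_snoc U x s

-- invariant of B's labelling fold: `used` has exactly the labels of `done`
theorem pvLabelInv : ∀ (g : List (List Char × String))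
    (st : List (List Char × String) × PySem.Set (List Char)),
    (∀ s, st.2.contains s = (st.1.map (·.1)).contains s) →
    ∀ s, ((g.foldl
        (fun (st : List (List Char × String) × PySem.Set (List Char)) p =>
          let label := pvProbe p.1 p.1 st.2 2 (st.1.length + 1)
          (st.1 ++ [(label, p.2)], st.2.add label)) st).2).contains s
      = (((g.foldl
        (fun (st : List (List Char × String) × PySem.Set (List Char)) p =>
          let label := pvProbe p.1 p.1 st.2 2 (st.1.length + 1)
          (st.1 ++ [(label, p.2)], st.2.add label)) st).1).map (·.1)).contains s := by
  intro g
  induction g with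
  | nil => intro st h s; exact h s
  | cons p t ih =>
      intro st h s
      rw [List.foldl_cons]
      apply ih
      intro s'
      rw [pvContains_add, h s', List.map_append]
      simp only [List.map_cons, List.map_nil]
      rw [pvContains_snoc]

-- snoc with A's Set.ofList probe collection folds back into pvLabelB
theorem pvSnoc_set (g : List (List Char × String)) (a : List Char) (c : String) :
    pvLabelB g ++ [(pvProbe a a (PySem.Set.ofList ((pvLabelB g).map (·.1))) 2
        ((pvLabelB g).length + 1), c)] = pvLabelB (g ++ [(a, c)]) := by
  unfold pvLabelB
  rw [List.foldl_append]
  simp only [List.foldl_cons, List.foldl_nil]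
  congr 2
  refine congrArg (fun lbl => (lbl, c)) ?_
  apply pvProbe_congr
  intro s
  exact (pvContains_ofList _ s).trans
    (pvLabelInv g ([], PySem.Set.empty) (fun _ => rfl) s).symm

-- the value-transforming map that relates the grouped pairs to A's labelled groups
def pvF (p : List Char × List (List Char × String)) : List Char × List (List Char × String) :=
  (p.1, pvLabelB p.2)

theorem pvGet?_mapF (l : List (List Char × List (List Char × String))) (k : List Char) :
    (PySem.Dict.mk (l.map pvF)).get? k
      = ((PySem.Dict.mk l).get? k).map pvLabelB := by
  induction l with
  | nil => rfl
  | cons p t ih =>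
      rw [List.map_cons]
      show (PySem.Dict.mk ((p.1, pvLabelB p.2) :: t.map pvF)).get? k = _
      rw [PySem.Dict.get?_mk_cons, PySem.Dict.get?_mk_cons]
      split
      · rfl
      · exact ih

theorem pvGetD_mapF (d : PySem.Dict (List Char) (List (List Char × String))) (k : List Char) :
    (PySem.Dict.mk (d.items.map pvF)).getD k [] = pvLabelB (d.getD k []) := by
  have hd : (PySem.Dict.mk d.items) = d := rfl
  rw [PySem.Dict.getD, PySem.Dict.getD, ← hd, pvGet?_mapF]
  cases (PySem.Dict.mk d.items).get? k with
  | none => rfl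
  | some v => rfl

theorem pvContains_mapF (l : List (List Char × List (List Char × String))) (k : List Char) :
    (PySem.Dict.mk (l.map pvF)).contains k = (PySem.Dict.mk l).contains k := by
  show (l.map pvF).any (fun p => p.1 == k) = l.any (fun p => p.1 == k)
  rw [List.any_map]
  rfl

theorem pvInsert_mapF (d : PySem.Dict (List Char) (List (List Char × String)))
    (k : List Char) (v : List (List Char × String)) :
    (PySem.Dict.mk (d.items.map pvF)).insert k (pvLabelB v)
      = PySem.Dict.mk ((d.insert k v).items.map pvF) := by
  rw [PySem.Dict.insert, PySem.Dict.insert]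
  have hc : (PySem.Dict.mk (d.items.map pvF)).contains k = d.contains k :=
    pvContains_mapF d.items k
  rw [hc]
  split
  · show PySem.Dict.mk _ = PySem.Dict.mk _
    congr 1
    show (d.items.map pvF).map _ = (d.items.map _).map pvF
    rw [List.map_map, List.map_map]
    apply List.map_congr_left
    intro p _
    show (if (p.1 == k) = true then (k, pvLabelB v) else pvF p)
      = pvF (if (p.1 == k) = true then (k, v) else p)
    split
    · rfl
    · rfl
  · show PySem.Dict.mk _ = PySem.Dict.mk _
    congr 1
    rw [List.map_append]
    rfl

-- the proof-side grouping fold: plain dict grouping of (key, pair) items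
def pvPack (c : String) : List Char × (List Char × String) :=
  ((pvKeysForB c.toList).1, ((pvKeysForB c.toList).2, c))

def pvG (cols : List String) : PySem.Dict (List Char) (List (List Char × String)) :=
  (cols.map pvPack).foldl (fun d p => d.modify p.1 [] (· ++ [p.2])) PySem.Dict.empty

-- one step of A's loop, acting on the pvF-image of the grouping dict, is the pvF-image of one grouping step
theorem pvStep_eq (d : PySem.Dict (List Char) (List (List Char × String))) (col : String) :
    (let gia := pvInferA col.toList
     let groupKey := pvSanitizeA gia.1
     let axisKey0 := pvSanitizeA gia.2.1
     let axisKey := if axisKey0.isEmpty then ['a','x','i','s'] else axisKey0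
     let group := (PySem.Dict.mk (d.items.map pvF)).getD groupKey []
     let existingAxes : PySem.Set (List Char) := PySem.Set.ofList (group.map (·.1))
     let axisLabel := pvProbe axisKey axisKey existingAxes 2 (group.length + 1)
     (PySem.Dict.mk (d.items.map pvF)).insert groupKey (group ++ [(axisLabel, col)]))
    = PySem.Dict.mk ((d.modify (pvPack col).1 [] (· ++ [(pvPack col).2])).items.map pvF) := by
  have hmod : d.modify (pvPack col).1 [] (· ++ [(pvPack col).2])
      = d.insert (pvPack col).1 (d.getD (pvPack col).1 [] ++ [(pvPack col).2]) := rfl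
  rw [hmod]
  show (let gia := pvInferA col.toList
     let groupKey := pvSanitizeA gia.1
     let axisKey0 := pvSanitizeA gia.2.1
     let axisKey := if axisKey0.isEmpty then ['a','x','i','s'] else axisKey0
     let group := (PySem.Dict.mk (d.items.map pvF)).getD groupKey []
     let existingAxes : PySem.Set (List Char) := PySem.Set.ofList (group.map (·.1))
     let axisLabel := pvProbe axisKey axisKey existingAxes 2 (group.length + 1)
     (PySem.Dict.mk (d.items.map pvF)).insert groupKey (group ++ [(axisLabel, col)])) = _
  simp only [pvPack]
  rw [pvKeys_eq]
  dsimp only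
  rw [pvSanitizeA_ne_empty]
  simp only [Bool.false_eq_true, if_false]
  rw [pvGetD_mapF, pvSnoc_set, pvInsert_mapF]

-- the whole of A's loop is the pvF-image of the grouping fold
theorem pvFold_eq : ∀ (cols : List String) (d : PySem.Dict (List Char) (List (List Char × String))),
    List.foldl
      (fun (groups : PySem.Dict (List Char) (List (List Char × String))) (col : String) =>
        let gia := pvInferA col.toList
        let groupKey := pvSanitizeA gia.1
        let axisKey0 := pvSanitizeA gia.2.1
        let axisKey := if axisKey0.isEmpty then ['a','x','i','s'] else axisKey0
        let group := groups.getD groupKey []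
        let existingAxes : PySem.Set (List Char) := PySem.Set.ofList (group.map (·.1))
        let axisLabel := pvProbe axisKey axisKey existingAxes 2 (group.length + 1)
        groups.insert groupKey (group ++ [(axisLabel, col)]))
      (PySem.Dict.mk (d.items.map pvF)) cols
    = PySem.Dict.mk
        ((List.foldl (fun d p => d.modify p.1 [] (· ++ [p.2])) d (cols.map pvPack)).items.map pvF) := by
  intro cols
  induction cols with
  | nil => intro d; rfl
  | cons c t ih =>
      intro d
      rw [List.map_cons, List.foldl_cons, List.foldl_cons, pvStep_eq d c, ih]

-- the grouping dict laid out as first-seen distinct keys with filtered values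
theorem pvG_items (cols : List String) :
    (pvG cols).items
      = (PySem.Set.ofList ((cols.map pvPack).map (·.1))).map
          (fun g => (g, ((cols.map pvPack).filter (fun p => p.1 == g)).map (·.2))) := by
  have hnd : (pvG cols).keys.Nodup := by
    unfold pvG
    exact PySem.Dict.nodup_keys_foldl_modify_key (cols.map pvPack) (·.1) []
      (fun d x => fun v => v ++ [x.2]) PySem.Dict.empty (by simp [PySem.Dict.keys_empty])
  have hkeys : (pvG cols).keys = PySem.Set.ofList ((cols.map pvPack).map (·.1)) := by
    unfold pvG
    have h := PySem.Dict.keys_foldl_modify_key (cols.map pvPack) (·.1) []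
      (fun d x => fun v => v ++ [x.2]) PySem.Dict.empty
    rw [h, PySem.Dict.keys_empty]
    rfl
  have hget : ∀ g, (pvG cols).getD g []
      = ((cols.map pvPack).filter (fun p => p.1 == g)).map (·.2) := by
    intro g
    unfold pvG
    have h := PySem.Dict.getD_foldl_modify_append (cols.map pvPack) PySem.Dict.empty g
    rw [h, PySem.Dict.getD_empty, List.nil_append]
  rw [PySem.Dict.items_eq_map_keys (pvG cols) hnd [], hkeys]
  apply List.map_congr_left
  intro g _
  rw [hget]

-- the packed list is B's keyed list re-paired (cheap: no projection through pvKeysForB)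
theorem pvKeyed_pack (cols : List String) :
    cols.map pvPack
      = (cols.map (fun c => (pvKeysForB c.toList, c))).map (fun q => (q.1.1, (q.1.2, q.2))) := by
  rw [List.map_map]
  exact List.map_congr_left (fun c _ => rfl)

-- filtering the packed list is filtering the keyed list (generic in the list)
theorem pvFP (l : List ((List Char × List Char) × String)) (g : List Char) :
    ((l.map (fun q => (q.1.1, (q.1.2, q.2)))).filter (fun p => p.1 == g)).map (·.2)
      = (l.filter (fun p => p.1.1 == g)).map (fun p => (p.1.2, p.2)) := by
  induction l with
  | nil => rfl
  | cons q t ih =>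
      simp only [List.map_cons, List.filter_cons]
      split
      · rw [List.map_cons, ih, List.map_cons]
      · exact ih

-- B's first-seen order of group keys is the key list of the grouping fold (generic in the list)
theorem pvOrd (l : List ((List Char × List Char) × String)) :
    l.foldl (fun (o : PySem.Set (List Char)) p => o.add p.1.1) PySem.Set.empty
      = PySem.Set.ofList ((l.map (fun q => (q.1.1, (q.1.2, q.2)))).map (·.1)) := by
  rw [List.map_map, ← PySem.Set.update_map_eq_foldl_add]
  exact PySem.Set.update_nil_left _

-- ===== VERDICT (by name: the statement is the Claim_ definition above) =====
theorem group_sensor_columns_py_spec : Claim_equal_group_sensor_columns_py := by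
  intro cols _
  unfold Spec_group_sensor_columns_py group_sensor_columns_py group_sensor_columns_py_alt
  have h := pvFold_eq cols PySem.Dict.empty
  rw [show PySem.Dict.mk (List.map pvF (PySem.Dict.empty :
        PySem.Dict (List Char) (List (List Char × String))).items)
      = (PySem.Dict.empty : PySem.Dict (List Char) (List (List Char × String))) from rfl] at h
  rw [h]
  show ((pvG cols).items.map pvF).map _ = _
  rw [pvG_items, pvKeyed_pack cols, ← pvOrd, List.map_map, List.map_map]
  apply List.map_congr_left
  intro g _
  show (String.ofList g,
      (pvLabelB ((((cols.map (fun c => (pvKeysForB c.toList, c))).map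
            (fun q => (q.1.1, (q.1.2, q.2)))).filter (fun p => p.1 == g)).map (·.2))).map
        (fun q => (String.ofList q.1, q.2))) = _
  rw [pvFP]
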